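-- pv_equiv track=rewrite | github.com/Hall-No-7/ps-study | dalcom/kakao-2020/kakao-key-lock/kakao-key-lock.py | solution
-- ===== SOURCE A (Python) =====
-- def expand(arr, isKey, sz, diff):
--     result = [[0 if isKey else 1 for _ in range(sz)] for _ in range(sz)]
--
--     for i in range(len(arr)):
--         for j in range(len(arr)):
--             result[i + diff][j + diff] = arr[i][j]
--     return result
--
-- def rotate(key):
--     result = [[[val for val in row] for row in key] for _ in range(4)]
--
--     for r in range(1, 4):
--         for i in range(len(key)):
--             for j in range(len(key[i])):
--                 result[r][j][len(key) - i - 1] = result[r - 1][i][j]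
--
--     return result
--
-- def isUnlock(key, lock):
--     tmp = [row[:] for row in lock]
--
--     for i in range(len(lock)):
--         for j in range(len(lock[0])):
--             tmp[i][j] += key[i][j]
--             if tmp[i][j] == 0 or tmp[i][j] > 1:
--                 return False
--     return True
--
-- def moveKey(key, r, c):
--     result = [[0 for _ in range(len(key))] for _ in range(len(key[0]))]
--
--     for i in range(len(key)):
--         for j in range(len(key[0])):
--             rr = i + r
--             cc = j + c
--             if rr < 0 or rr >= len(key) or cc < 0 or cc >= len(key[0]):
--                 continue
--             result[rr][cc] = key[i][j]
--
--     return result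
--
-- def solution(key, lock):
--     if len(key) > len(lock):
--         lock = expand(lock, False, len(key), (len(key) - len(lock)) // 2)
--     elif len(key) < len(lock):
--         key = expand(key, True, len(lock), (len(lock) - len(key)) // 2)
--
--     for rkey in rotate(key):
--         for i in range(-len(key) + 1, len(key)):
--             for j in range(-len(key) + 1, len(key)):
--                 newKey = moveKey(rkey, i, j)
--
--                 if isUnlock(newKey, lock):
--                     return True
--
--     return False
-- ===== SOURCE B (Python) =====
-- def okcell(s):
--     return s != 0 and s <= 1
--
-- def solution(key, lock):
--     m, n = len(key), len(lock)
--     M = max(m, n)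
--     dl = (m - n) // 2 if m > n else 0
--     dk = (n - m) // 2 if n > m else 0
--     L = [[lock[i - dl][j - dl] if dl <= i < n + dl and dl <= j < n + dl else 1
--           for j in range(M)] for i in range(M)]
--     triples = [(p + dk, q + dk, key[p][q])
--                for p in range(m) for q in range(m) if key[p][q] != 0]
--     bad = [(i, j) for i in range(M) for j in range(M)
--            if L[i][j] == 0 or L[i][j] > 1]
--     for _ in range(4):
--         coords = {(p, q) for p, q, _ in triples}
--         for r in range(1 - M, M):
--             for c in range(1 - M, M):
--                 if all(okcell(L[p + r][q + c] + k)
--                        for p, q, k in triples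
--                        if 0 <= p + r < M and 0 <= q + c < M) \
--                    and all((i - r, j - c) in coords for i, j in bad):
--                     return True
--         triples = [(q, M - 1 - p, k) for p, q, k in triples]
--     return False
-- ===== Notes on version B (the rewrite author's own statement) =====
-- stated objective: faster
-- what changed: B never materializes a rotated or shifted grid: it extracts the key's nonzero cells and the lock's violated cells once as coordinate lists (plus a coordinate set), tests each rotation/offset by scanning only those lists, and applies each rotation to the coordinates themselves by the index map (p,q)->(q,M-1-p).
-- outside the precondition, e.g. on solution([[0, 1]], [[1], [1]]): A returns True, B raises IndexError
import Mathlib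
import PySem

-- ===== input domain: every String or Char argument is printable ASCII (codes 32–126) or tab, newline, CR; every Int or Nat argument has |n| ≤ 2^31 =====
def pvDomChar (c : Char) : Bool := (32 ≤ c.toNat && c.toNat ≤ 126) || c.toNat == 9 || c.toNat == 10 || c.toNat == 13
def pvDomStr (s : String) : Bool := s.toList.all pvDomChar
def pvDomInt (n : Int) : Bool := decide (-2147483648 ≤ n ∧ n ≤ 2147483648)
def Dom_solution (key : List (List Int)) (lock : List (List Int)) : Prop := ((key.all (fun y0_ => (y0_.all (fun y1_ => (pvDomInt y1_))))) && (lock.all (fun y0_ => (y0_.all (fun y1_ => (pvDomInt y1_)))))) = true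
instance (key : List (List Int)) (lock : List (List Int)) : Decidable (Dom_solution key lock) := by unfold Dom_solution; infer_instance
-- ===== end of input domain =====

-- B never builds a rotated or shifted grid: it lists the key's nonzero cells and the lock's
-- violated cells once, tests each rotation/offset by scanning only those lists, and rotates the
-- coordinates themselves (objective: faster, constant-factor).

-- shared primitive accessors for the Python subscripts g[i][j] (read / write); reads are always
-- in range under Pre_solution, so the getD default is never the value Python would not compute
def gget (g : List (List Int)) (i j : Nat) : Int := (g.getD i []).getD j 0
def set2 (g : List (List Int)) (i j : Nat) (v : Int) : List (List Int) :=
  g.set i ((g.getD i []).set j v)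

-- ===== PORT A =====
def set3 (g : List (List (List Int))) (r i j : Nat) (v : Int) : List (List (List Int)) :=
  g.set r (set2 (g.getD r []) i j v)

def expandA (arr : List (List Int)) (isKey : Bool) (sz : Nat) (diff : Nat) : List (List Int) :=
  let base := (List.range sz).map (fun _ => (List.range sz).map (fun _ => if isKey then (0 : Int) else 1))
  (List.range arr.length).foldl (fun res i =>
    (List.range arr.length).foldl (fun res j =>
      set2 res (i + diff) (j + diff) (gget arr i j)) res) base

def rotateA (key : List (List Int)) : List (List (List Int)) :=
  let base := (List.range 4).map (fun _ => key.map (fun row => row.map (fun v => v)))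
  (List.range' 1 3).foldl (fun res r =>
    (List.range key.length).foldl (fun res i =>
      (List.range ((key.getD i []).length)).foldl (fun res j =>
        set3 res r j (key.length - 1 - i) (gget (res.getD (r - 1) []) i j)) res) res) base

-- tmp[i][j] is written once and read immediately, so the write-back to tmp is not materialized:
-- the tested value lock[i][j] + key[i][j] is the same value Python tests
def isUnlockA (key : List (List Int)) (lock : List (List Int)) : Bool :=
  (List.range lock.length).all (fun i =>
    (List.range ((lock.getD 0 []).length)).all (fun j =>
      let v := gget lock i j + gget key i j
      !(v == 0 || decide (v > 1))))

def moveKeyA (key : List (List Int)) (r c : Int) : List (List Int) :=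
  let base := (List.range ((key.getD 0 []).length)).map (fun _ =>
    (List.range key.length).map (fun _ => (0 : Int)))
  (List.range key.length).foldl (fun res (i : Nat) =>
    (List.range ((key.getD 0 []).length)).foldl (fun res (j : Nat) =>
      if (i : Int) + r < 0 ∨ (i : Int) + r ≥ (key.length : Int) ∨
         (j : Int) + c < 0 ∨ (j : Int) + c ≥ (((key.getD 0 []).length : Int)) then res
      else set2 res ((i : Int) + r).toNat ((j : Int) + c).toNat (gget key i j)) res) base

def solution (key : List (List Int)) (lock : List (List Int)) : Bool :=
  -- diff arguments (len(key)-len(lock))//2 are taken in Nat: exact, since the branch guarantees the minuend is larger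
  let p : List (List Int) × List (List Int) :=
    if lock.length < key.length then
      (key, expandA lock false key.length ((key.length - lock.length) / 2))
    else if key.length < lock.length then
      (expandA key true lock.length ((lock.length - key.length) / 2), lock)
    else (key, lock)
  let key := p.1
  let lock := p.2
  (rotateA key).any (fun rkey =>
    (PySem.List.pyRange (-(key.length : Int) + 1) (key.length : Int) 1).any (fun i =>
      (PySem.List.pyRange (-(key.length : Int) + 1) (key.length : Int) 1).any (fun j =>
        isUnlockA (moveKeyA rkey i j) lock)))

-- ===== PORT B =====
def okB (s : Int) : Bool := !(s == 0) && decide (s ≤ 1)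

-- L[p+r][q+c]: the guard in altCheck guarantees both indices are in 0..M-1, so toNat is exact
def ggetI (g : List (List Int)) (i j : Int) : Int := gget g i.toNat j.toNat

def altL (lock : List (List Int)) (n M dl : Nat) : List (List Int) :=
  (List.range M).map (fun i => (List.range M).map (fun j =>
    if dl ≤ i ∧ i < n + dl ∧ dl ≤ j ∧ j < n + dl then gget lock (i - dl) (j - dl) else 1))

def altTriples (key : List (List Int)) (m dk : Nat) : List (Int × Int × Int) :=
  (List.range m).flatMap (fun p => (List.range m).filterMap (fun q =>
    if gget key p q ≠ 0 then some (((p + dk : Nat) : Int), ((q + dk : Nat) : Int), gget key p q)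
    else none))

def altBad (L : List (List Int)) (M : Nat) : List (Int × Int) :=
  (List.range M).flatMap (fun i => (List.range M).filterMap (fun j =>
    if gget L i j = 0 ∨ gget L i j > 1 then some (((i : Nat) : Int), ((j : Nat) : Int)) else none))

def altCheck (M : Nat) (L : List (List Int)) (ts : List (Int × Int × Int))
    (bad : List (Int × Int)) (coords : PySem.Set (Int × Int)) : Bool :=
  (PySem.List.pyRange (1 - (M : Int)) (M : Int) 1).any (fun r =>
    (PySem.List.pyRange (1 - (M : Int)) (M : Int) 1).any (fun c =>
      (ts.all (fun x =>
        if 0 ≤ x.1 + r ∧ x.1 + r < (M : Int) ∧ 0 ≤ x.2.1 + c ∧ x.2.1 + c < (M : Int)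
        then okB (ggetI L (x.1 + r) (x.2.1 + c) + x.2.2) else true))
      && (bad.all (fun ij => PySem.Set.contains coords (ij.1 - r, ij.2 - c)))))

def altLoop : Nat → Nat → List (List Int) → List (Int × Int × Int) → List (Int × Int) → Bool
  | 0, _, _, _, _ => false
  | t + 1, M, L, ts, bad =>
    let coords := PySem.Set.ofList (ts.map (fun x => (x.1, x.2.1)))
    if altCheck M L ts bad coords then true
    else altLoop t M L (ts.map (fun x => (x.2.1, (M : Int) - 1 - x.1, x.2.2))) bad

def solution_alt (key : List (List Int)) (lock : List (List Int)) : Bool :=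
  let m := key.length
  let n := lock.length
  let M := max m n
  let dl := if n < m then (m - n) / 2 else 0
  let dk := if m < n then (n - m) / 2 else 0
  let L := altL lock n M dl
  let ts := altTriples key m dk
  let bad := altBad L M
  altLoop 4 M L ts bad

-- ===== PRECONDITION & SPEC =====
-- Pre_ excludes non-square matrices: these are malformed grids for this puzzle — A raises
-- IndexError on most of them, and where it happens to return, the value is an accident of A's
-- scan order (over-long rows silently truncated, early False before the raising cell is reached).
def Pre_solution (key : List (List Int)) (lock : List (List Int)) : Prop :=
  (∀ row ∈ key, row.length = key.length) ∧ (∀ row ∈ lock, row.length = lock.length)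
instance (key : List (List Int)) (lock : List (List Int)) : Decidable (Pre_solution key lock) := by
  unfold Pre_solution; infer_instance

def pvWitness_solution : List (List Int) × List (List Int) := ([[1]], [[0]])

def Spec_solution (key : List (List Int)) (lock : List (List Int)) (out : Bool) : Prop := out = solution_alt key lock
instance (key : List (List Int)) (lock : List (List Int)) (out : Bool) : Decidable (Spec_solution key lock out) := by unfold Spec_solution; infer_instance

-- ===== CLAIM (what is proved, stated in full; the proofs are below) =====
def Claim_equal_solution : Prop := ∀ (key : List (List Int)) (lock : List (List Int)), Dom_solution key lock → Pre_solution key lock → Spec_solution key lock (solution key lock)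

-- ===== LEMMAS AND PROOFS =====

def Shape (g : List (List Int)) (M : Nat) : Prop :=
  g.length = M ∧ ∀ i, i < M → (g.getD i []).length = M

lemma shape_row0 {g : List (List Int)} {M : Nat} (h : Shape g M) : (g.getD 0 []).length = M := by
  rcases h with ⟨h1, h2⟩
  cases M with
  | zero => have : g = [] := List.length_eq_zero_iff.mp h1; subst this; simp [List.getD]
  | succ k => exact h2 0 (Nat.succ_pos _)

lemma getD_set_lem (g : List (List Int)) (p i : Nat) (x : List Int) :
    (g.set p x).getD i [] = if p = i ∧ p < g.length then x else g.getD i [] := by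
  simp only [List.getD_eq_getElem?_getD, List.getElem?_set]
  split_ifs with h1 h2 h3 <;> simp_all <;> try omega

lemma rowset_lem (l : List Int) (q' q : Nat) (v : Int) :
    (l.set q' v).getD q 0 = if q' = q ∧ q' < l.length then v else l.getD q 0 := by
  simp only [List.getD_eq_getElem?_getD, List.getElem?_set]
  split_ifs with h1 h2 h3 <;> simp_all <;> try omega

lemma shape_set2 {g : List (List Int)} {M p q : Nat} (h : Shape g M) (hp : p < M) (hq : q < M)
    (v : Int) : Shape (set2 g p q v) M := by
  obtain ⟨h1, h2⟩ := h
  refine ⟨by simp [set2, h1], fun i hi => ?_⟩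
  rw [set2, getD_set_lem]
  split
  · rw [List.length_set]
    exact h2 p hp
  · exact h2 i hi

lemma gget_set2 {g : List (List Int)} {M p' q' : Nat} (h : Shape g M) (hp : p' < M) (hq : q' < M)
    (v : Int) (p q : Nat) :
    gget (set2 g p' q' v) p q = if p = p' ∧ q = q' then v else gget g p q := by
  obtain ⟨h1, h2⟩ := h
  rw [gget, set2, getD_set_lem]
  by_cases hpp : p' = p
  · subst hpp
    rw [if_pos ⟨rfl, by omega⟩, rowset_lem, h2 p' hp]
    by_cases hqq : q' = q
    · subst hqq; rw [if_pos ⟨rfl, hq⟩, if_pos ⟨rfl, rfl⟩]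
    · rw [if_neg (by tauto), if_neg (by tauto)]; rfl
  · rw [if_neg (by tauto), if_neg (by tauto)]; rfl

lemma shape_base (M : Nat) (bg : Int) :
    Shape ((List.range M).map (fun _ => (List.range M).map (fun _ => bg))) M := by
  refine ⟨by simp, fun i hi => ?_⟩
  rw [List.getD_eq_getElem?_getD]
  simp [hi]

lemma gget_base (M : Nat) (bg : Int) {p q : Nat} (hp : p < M) (hq : q < M) :
    gget ((List.range M).map (fun _ => (List.range M).map (fun _ => bg))) p q = bg := by
  rw [gget, List.getD_eq_getElem?_getD]
  simp [hp, List.getD_eq_getElem?_getD, hq]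

lemma foldl_writes_char {M : Nat} (cond : Nat × Nat → Prop) [DecidablePred cond]
    (ρ γ : Nat × Nat → Nat) (f : Nat × Nat → Int) (τ : Nat → Nat → Option (Nat × Nat))
    (step : List (List Int) → Nat × Nat → List (List Int))
    (hstep : ∀ g ij, step g ij = if cond ij then set2 g (ρ ij) (γ ij) (f ij) else g)
    (ws : List (Nat × Nat))
    (hfwd : ∀ ij ∈ ws, cond ij → ρ ij < M ∧ γ ij < M ∧ τ (ρ ij) (γ ij) = some ij)
    (hbwd : ∀ p q ij, τ p q = some ij → cond ij ∧ ρ ij = p ∧ γ ij = q)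
    (g₀ : List (List Int)) (h₀ : Shape g₀ M) :
    Shape (ws.foldl step g₀) M ∧
    ∀ p q, gget (ws.foldl step g₀) p q =
      match τ p q with
      | some ij => if ij ∈ ws then f ij else gget g₀ p q
      | none => gget g₀ p q := by
  induction ws generalizing g₀ with
  | nil =>
    refine ⟨h₀, fun p q => ?_⟩
    cases hτ : τ p q <;> simp
  | cons ij₀ tl IH =>
    have hsh1 : Shape (step g₀ ij₀) M := by
      rw [hstep]
      split_ifs with hc
      · obtain ⟨hρ, hγ, -⟩ := hfwd ij₀ List.mem_cons_self hc
        exact shape_set2 h₀ hρ hγ _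
      · exact h₀
    obtain ⟨hshF, hent⟩ := IH (fun ij h hc => hfwd ij (List.mem_cons_of_mem _ h) hc) (step g₀ ij₀) hsh1
    refine ⟨hshF, fun p q => ?_⟩
    rw [List.foldl_cons, hent p q]
    cases hτ : τ p q with
    | none =>
      show gget (step g₀ ij₀) p q = gget g₀ p q
      rw [hstep]
      split_ifs with hc
      · obtain ⟨hρ, hγ, hτw⟩ := hfwd ij₀ List.mem_cons_self hc
        rw [gget_set2 h₀ hρ hγ]
        rw [if_neg]
        rintro ⟨rfl, rfl⟩
        rw [hτw] at hτ
        exact Option.some_ne_none _ hτ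
      · rfl
    | some ij =>
      show (if ij ∈ tl then f ij else gget (step g₀ ij₀) p q) =
        (if ij ∈ ij₀ :: tl then f ij else gget g₀ p q)
      by_cases hmem : ij ∈ tl
      · simp [hmem]
      · rw [if_neg hmem]
        by_cases hij : ij = ij₀
        · subst hij
          obtain ⟨hc, hρp, hγq⟩ := hbwd p q ij hτ
          obtain ⟨hρ, hγ, -⟩ := hfwd ij List.mem_cons_self hc
          rw [if_pos List.mem_cons_self, hstep, if_pos hc, gget_set2 h₀ hρ hγ,
              if_pos ⟨hρp.symm, hγq.symm⟩]
        · have hnot : ij ∉ ij₀ :: tl := by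
            simp only [List.mem_cons]
            tauto
          rw [if_neg hnot, hstep]
          split_ifs with hc
          · obtain ⟨hρ, hγ, hτw⟩ := hfwd ij₀ List.mem_cons_self hc
            rw [gget_set2 h₀ hρ hγ, if_neg]
            rintro ⟨rfl, rfl⟩
            rw [hτw] at hτ
            exact hij (Option.some.inj hτ).symm
          · rfl

lemma all_congr' {α : Type} (l : List α) (f g : α → Bool) (h : ∀ x ∈ l, f x = g x) :
    l.all f = l.all g := by
  induction l with
  | nil => rfl
  | cons a t IH =>
    simp only [List.all_cons, h a List.mem_cons_self,
      IH (fun x hx => h x (List.mem_cons_of_mem _ hx))]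

lemma any_congr' {α : Type} (l : List α) (f g : α → Bool) (h : ∀ x ∈ l, f x = g x) :
    l.any f = l.any g := by
  induction l with
  | nil => rfl
  | cons a t IH =>
    simp only [List.any_cons, h a List.mem_cons_self,
      IH (fun x hx => h x (List.mem_cons_of_mem _ hx))]

lemma nested_eq_flat {α : Type} (a : Nat) (bfun : Nat → Nat) (F : α → Nat → Nat → α) (g₀ : α) :
    (List.range a).foldl (fun g i => (List.range (bfun i)).foldl (fun g j => F g i j) g) g₀ =
    ((List.range a).flatMap (fun i => (List.range (bfun i)).map (fun j => (i, j)))).foldl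
      (fun g ij => F g ij.1 ij.2) g₀ := by
  induction a generalizing g₀ with
  | zero => simp
  | succ n IH =>
    rw [List.range_succ, List.foldl_append, List.flatMap_append, List.foldl_append, IH]
    simp [List.foldl_map]

lemma mem_flatpairs (a : Nat) (bfun : Nat → Nat) (ij : Nat × Nat) :
    ij ∈ (List.range a).flatMap (fun i => (List.range (bfun i)).map (fun j => (i, j))) ↔
      ij.1 < a ∧ ij.2 < bfun ij.1 := by
  obtain ⟨i, j⟩ := ij
  simp only [List.mem_flatMap, List.mem_map, List.mem_range, Prod.mk.injEq]
  constructor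
  · rintro ⟨i', hi', j', hj', rfl, rfl⟩
    exact ⟨hi', hj'⟩
  · rintro ⟨h1, h2⟩
    exact ⟨i, h1, j, h2, rfl, rfl⟩

lemma fold2_char {M : Nat} (a : Nat) (bfun : Nat → Nat)
    (cond : Nat → Nat → Prop) [inst : ∀ i j, Decidable (cond i j)]
    (ρ γ : Nat → Nat → Nat) (f : Nat → Nat → Int) (τ : Nat → Nat → Option (Nat × Nat))
    (step2 : List (List Int) → Nat → Nat → List (List Int))
    (hstep : ∀ g i j, step2 g i j = if cond i j then set2 g (ρ i j) (γ i j) (f i j) else g)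
    (hfwd : ∀ i j, i < a → j < bfun i → cond i j →
      ρ i j < M ∧ γ i j < M ∧ τ (ρ i j) (γ i j) = some (i, j))
    (hbwd : ∀ p q i j, τ p q = some (i, j) →
      i < a ∧ j < bfun i ∧ cond i j ∧ ρ i j = p ∧ γ i j = q)
    (g₀ : List (List Int)) (h₀ : Shape g₀ M) :
    Shape ((List.range a).foldl (fun g i =>
      (List.range (bfun i)).foldl (fun g j => step2 g i j) g) g₀) M ∧
    ∀ p q, gget ((List.range a).foldl (fun g i =>
      (List.range (bfun i)).foldl (fun g j => step2 g i j) g) g₀) p q =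
        match τ p q with
        | some ij => f ij.1 ij.2
        | none => gget g₀ p q := by
  rw [nested_eq_flat]
  obtain ⟨hsh, hent⟩ := foldl_writes_char (fun ij => cond ij.1 ij.2)
    (fun ij => ρ ij.1 ij.2) (fun ij => γ ij.1 ij.2) (fun ij => f ij.1 ij.2) τ
    (fun g ij => if cond ij.1 ij.2 then set2 g (ρ ij.1 ij.2) (γ ij.1 ij.2) (f ij.1 ij.2) else g)
    (fun g ij => rfl)
    ((List.range a).flatMap (fun i => (List.range (bfun i)).map (fun j => (i, j))))
    (fun ij hm hc => hfwd ij.1 ij.2 ((mem_flatpairs a bfun ij).mp hm).1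
      ((mem_flatpairs a bfun ij).mp hm).2 hc)
    (fun p q ij hτ => by
      obtain ⟨i, j⟩ := ij
      obtain ⟨-, -, hc, hρ, hγ⟩ := hbwd p q i j hτ
      exact ⟨hc, hρ, hγ⟩)
    g₀ h₀
  have hfold : ((List.range a).flatMap (fun i => (List.range (bfun i)).map (fun j => (i, j)))).foldl
      (fun g ij => step2 g ij.1 ij.2) g₀ =
    ((List.range a).flatMap (fun i => (List.range (bfun i)).map (fun j => (i, j)))).foldl
      (fun g ij => if cond ij.1 ij.2 then set2 g (ρ ij.1 ij.2) (γ ij.1 ij.2) (f ij.1 ij.2) else g) g₀ := by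
    congr 1
    funext g ij
    exact hstep g ij.1 ij.2
  rw [hfold]
  refine ⟨hsh, fun p q => ?_⟩
  rw [hent p q]
  cases hτ : τ p q with
  | none => rfl
  | some ij =>
    obtain ⟨i, j⟩ := ij
    obtain ⟨hia, hjb, hc, -, -⟩ := hbwd p q i j hτ
    show (if (i, j) ∈ _ then f i j else gget g₀ p q) = f i j
    rw [if_pos ((mem_flatpairs a bfun (i, j)).mpr ⟨hia, hjb⟩)]

lemma getD_set_gen {α : Type} (l : List α) (p i : Nat) (x d : α) :
    (l.set p x).getD i d = if p = i ∧ p < l.length then x else l.getD i d := by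
  simp only [List.getD_eq_getElem?_getD, List.getElem?_set]
  split_ifs with h1 h2 h3 <;> simp_all <;> try omega

lemma foldl_set3_commute (ws : List (Nat × Nat)) (r : Nat) (hr0 : r ≠ 0)
    (w1 w2 : Nat → Nat → Nat) (LL : List (List (List Int))) (hrlen : r < LL.length)
    (x : List (List Int)) :
    ws.foldl (fun res ij => set3 res r (w1 ij.1 ij.2) (w2 ij.1 ij.2)
      (gget (res.getD (r - 1) []) ij.1 ij.2)) (LL.set r x) =
    LL.set r (ws.foldl (fun g ij => set2 g (w1 ij.1 ij.2) (w2 ij.1 ij.2)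
      (gget (LL.getD (r - 1) []) ij.1 ij.2)) x) := by
  induction ws generalizing x with
  | nil => rfl
  | cons ij tl IH =>
    rw [List.foldl_cons, List.foldl_cons]
    have h1 : (LL.set r x).getD (r - 1) [] = LL.getD (r - 1) [] := by
      rw [getD_set_gen]
      rw [if_neg (by omega)]
    have h2 : (LL.set r x).getD r [] = x := by
      rw [getD_set_gen, if_pos ⟨rfl, hrlen⟩]
    show (tl.foldl _ (set3 (LL.set r x) r (w1 ij.1 ij.2) (w2 ij.1 ij.2)
      (gget ((LL.set r x).getD (r - 1) []) ij.1 ij.2))) = _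
    rw [set3, h1, h2, List.set_set]
    exact IH _

lemma pass_char {M : Nat} (keyA prev init : List (List Int)) (hkA : Shape keyA M)
    (hinit : Shape init M) :
    Shape ((List.range keyA.length).foldl (fun g i =>
      (List.range ((keyA.getD i []).length)).foldl (fun g j =>
        set2 g j (keyA.length - 1 - i) (gget prev i j)) g) init) M ∧
    ∀ p q, p < M → q < M →
      gget ((List.range keyA.length).foldl (fun g i =>
        (List.range ((keyA.getD i []).length)).foldl (fun g j =>
          set2 g j (keyA.length - 1 - i) (gget prev i j)) g) init) p q =
        gget prev (M - 1 - q) p := by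
  obtain ⟨hlen, hrow⟩ := hkA
  obtain ⟨hsh, hent⟩ := fold2_char (M := M) keyA.length (fun i => (keyA.getD i []).length)
    (fun _ _ => True) (fun _ j => j) (fun i _ => keyA.length - 1 - i) (fun i j => gget prev i j)
    (fun p q => if p < M ∧ q < M then some (M - 1 - q, p) else none)
    (fun g i j => set2 g j (keyA.length - 1 - i) (gget prev i j))
    (fun g i j => by simp)
    (fun i j hi hj _ => by
      dsimp only at hj ⊢
      have hiM : i < M := by omega
      have hjM : j < M := by rw [hrow i hiM] at hj; exact hj
      refine ⟨hjM, by omega, ?_⟩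
      rw [if_pos ⟨hjM, by omega⟩]
      have e : M - 1 - (keyA.length - 1 - i) = i := by omega
      rw [e])
    (fun p q i j hτ => by
      dsimp only at hτ ⊢
      split at hτ
      · rename_i hC
        obtain ⟨hp, hq⟩ := hC
        cases hτ
        refine ⟨by omega, ?_, trivial, rfl, by omega⟩
        rw [hrow (M - 1 - q) (by omega)]
        omega
      · exact absurd hτ (by simp))
    init hinit
  refine ⟨hsh, fun p q hp hq => ?_⟩
  rw [hent p q]
  rw [if_pos ⟨hp, hq⟩]

lemma expandA_char (arr : List (List Int)) (isKey : Bool) (sz d : Nat)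
    (h : arr.length + d ≤ sz) :
    Shape (expandA arr isKey sz d) sz ∧
    ∀ p q, p < sz → q < sz → gget (expandA arr isKey sz d) p q =
      if d ≤ p ∧ p < arr.length + d ∧ d ≤ q ∧ q < arr.length + d
      then gget arr (p - d) (q - d) else (if isKey then 0 else 1) := by
  rw [expandA]
  obtain ⟨hsh, hent⟩ := fold2_char (M := sz) arr.length (fun _ => arr.length)
    (fun _ _ => True) (fun i _ => i + d) (fun _ j => j + d) (fun i j => gget arr i j)
    (fun p q => if d ≤ p ∧ p < arr.length + d ∧ d ≤ q ∧ q < arr.length + d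
      then some (p - d, q - d) else none)
    (fun g i j => set2 g (i + d) (j + d) (gget arr i j))
    (fun g i j => by simp)
    (fun i j hi hj _ => by
      dsimp only at hj ⊢
      refine ⟨by omega, by omega, ?_⟩
      rw [if_pos (by omega)]
      have e1 : i + d - d = i := by omega
      have e2 : j + d - d = j := by omega
      rw [e1, e2])
    (fun p q i j hτ => by
      dsimp only at hτ ⊢
      split at hτ
      · rename_i hC
        cases hτ
        refine ⟨by omega, by omega, trivial, by omega, by omega⟩
      · exact absurd hτ (by simp))
    _ (shape_base sz _)
  refine ⟨hsh, fun p q hp hq => ?_⟩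
  rw [hent p q]
  by_cases hC : d ≤ p ∧ p < arr.length + d ∧ d ≤ q ∧ q < arr.length + d
  · rw [if_pos hC, if_pos hC]
  · rw [if_neg hC, if_neg hC]
    exact gget_base sz _ hp hq

lemma movekey_char {M : Nat} (rk : List (List Int)) (hsh : Shape rk M) (r c : Int) :
    Shape (moveKeyA rk r c) M ∧
    ∀ p q, p < M → q < M →
      gget (moveKeyA rk r c) p q =
        if 0 ≤ (p : Int) - r ∧ (p : Int) - r < (M : Int) ∧
           0 ≤ (q : Int) - c ∧ (q : Int) - c < (M : Int)
        then gget rk ((p : Int) - r).toNat ((q : Int) - c).toNat else 0 := by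
  have h1 : rk.length = M := hsh.1
  have h2 : (rk.getD 0 []).length = M := shape_row0 hsh
  rw [moveKeyA, h1, h2]
  obtain ⟨hshF, hent⟩ := fold2_char (M := M) M (fun _ => M)
    (fun i j => ¬((i : Int) + r < 0 ∨ (i : Int) + r ≥ (M : Int) ∨
      (j : Int) + c < 0 ∨ (j : Int) + c ≥ (M : Int)))
    (fun i _ => ((i : Int) + r).toNat) (fun _ j => ((j : Int) + c).toNat)
    (fun i j => gget rk i j)
    (fun p q => if p < M ∧ q < M ∧ 0 ≤ (p : Int) - r ∧ (p : Int) - r < (M : Int) ∧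
        0 ≤ (q : Int) - c ∧ (q : Int) - c < (M : Int)
      then some (((p : Int) - r).toNat, ((q : Int) - c).toNat) else none)
    (fun g i j =>
      if (i : Int) + r < 0 ∨ (i : Int) + r ≥ (M : Int) ∨
         (j : Int) + c < 0 ∨ (j : Int) + c ≥ (M : Int) then g
      else set2 g ((i : Int) + r).toNat ((j : Int) + c).toNat (gget rk i j))
    (fun g i j => by rw [ite_not])
    (fun i j hi hj hc => by
      dsimp only at hj hc ⊢
      refine ⟨by omega, by omega, ?_⟩
      rw [if_pos ⟨by omega, by omega, by omega, by omega, by omega, by omega⟩]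
      have e1 : (((((i : Int) + r).toNat : Nat) : Int) - r).toNat = i := by omega
      have e2 : (((((j : Int) + c).toNat : Nat) : Int) - c).toNat = j := by omega
      rw [e1, e2])
    (fun p q i j hτ => by
      dsimp only at hτ ⊢
      split at hτ
      · rename_i hC
        cases hτ
        refine ⟨by omega, by omega, by omega, by omega, by omega⟩
      · exact absurd hτ (by simp))
    _ (shape_base M _)
  refine ⟨hshF, fun p q hp hq => ?_⟩
  rw [hent p q]
  by_cases hC : 0 ≤ (p : Int) - r ∧ (p : Int) - r < (M : Int) ∧
      0 ≤ (q : Int) - c ∧ (q : Int) - c < (M : Int)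
  · rw [if_pos ⟨hp, hq, hC.1, hC.2.1, hC.2.2.1, hC.2.2.2⟩, if_pos hC]
  · rw [if_neg (fun h => hC ⟨h.2.2.1, h.2.2.2.1, h.2.2.2.2.1, h.2.2.2.2.2⟩), if_neg hC]
    exact gget_base M _ hp hq

lemma cell_bool (v : Int) : (!(v == 0 || decide (v > 1))) = okB v := by
  simp only [okB, Bool.not_or]
  congr 1
  rw [← decide_not]
  exact decide_eq_decide.mpr (by omega)

lemma getD_mem_of_lt {α : Type} {l : List α} {n : Nat} (h : n < l.length) (d : α) :
    l.getD n d ∈ l := by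
  rw [List.getD_eq_getElem?_getD, List.getElem?_eq_getElem h]
  exact List.getElem_mem h

lemma rot_step {M : Nat} (keyA : List (List Int)) (hkA : Shape keyA M) (r : Nat) (hr0 : r ≠ 0)
    (LL : List (List (List Int))) (x prev : List (List Int)) (hx : Shape x M)
    (hrlen : r < LL.length) (hgetr1 : LL.getD (r - 1) [] = prev)
    (LL₀ : List (List (List Int))) (hLL0 : LL₀ = LL.set r x) :
    ∃ P, ((List.range keyA.length).foldl (fun res i =>
        (List.range ((keyA.getD i []).length)).foldl (fun res j =>
          set3 res r j (keyA.length - 1 - i) (gget (res.getD (r - 1) []) i j)) res) LL₀)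
      = LL.set r P ∧ Shape P M ∧
      ∀ p q, p < M → q < M → gget P p q = gget prev (M - 1 - q) p := by
  subst hLL0
  rw [nested_eq_flat _ _ (fun g i j => set3 g r j (keyA.length - 1 - i)
    (gget (g.getD (r - 1) []) i j))]
  rw [foldl_set3_commute _ r hr0 (fun i j => j) (fun i j => keyA.length - 1 - i) LL hrlen x]
  rw [hgetr1]
  rw [← nested_eq_flat _ _ (fun g i j => set2 g j (keyA.length - 1 - i) (gget prev i j))]
  obtain ⟨hsh, hent⟩ := pass_char keyA prev x hkA hx
  exact ⟨_, rfl, hsh, hent⟩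

lemma rotateA_char {M : Nat} (keyA : List (List Int)) (hkA : Shape keyA M) :
    ∃ P1 P2 P3, rotateA keyA = [keyA, P1, P2, P3] ∧
      Shape P1 M ∧ Shape P2 M ∧ Shape P3 M ∧
      (∀ p q, p < M → q < M → gget P1 p q = gget keyA (M - 1 - q) p) ∧
      (∀ p q, p < M → q < M → gget P2 p q = gget P1 (M - 1 - q) p) ∧
      (∀ p q, p < M → q < M → gget P3 p q = gget P2 (M - 1 - q) p) := by
  rw [rotateA]
  have hid : keyA.map (fun row => row.map (fun v => v)) = keyA := by simp
  rw [hid]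
  have hb : (List.range 4).map (fun _ => keyA) = [keyA, keyA, keyA, keyA] := rfl
  rw [hb]
  have hr' : List.range' 1 3 = [1, 2, 3] := rfl
  rw [hr', List.foldl_cons, List.foldl_cons, List.foldl_cons, List.foldl_nil]
  obtain ⟨P1, e1, hs1, he1⟩ := rot_step keyA hkA 1 (by omega) [keyA, keyA, keyA, keyA]
    keyA keyA hkA (by simp) rfl [keyA, keyA, keyA, keyA] rfl
  rw [e1]
  obtain ⟨P2, e2, hs2, he2⟩ := rot_step keyA hkA 2 (by omega) [keyA, P1, keyA, keyA]
    keyA P1 hkA (by simp) rfl ([keyA, keyA, keyA, keyA].set 1 P1) rfl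
  rw [e2]
  obtain ⟨P3, e3, hs3, he3⟩ := rot_step keyA hkA 3 (by omega) [keyA, P1, P2, keyA]
    keyA P2 hkA (by simp) rfl ([keyA, P1, keyA, keyA].set 2 P2) rfl
  rw [e3]
  exact ⟨P1, P2, P3, rfl, hs1, hs2, hs3, he1, he2, he3⟩

lemma altL_entry (lock : List (List Int)) (n M dl : Nat) (p q : Nat) (hp : p < M) (hq : q < M) :
    gget (altL lock n M dl) p q =
      if dl ≤ p ∧ p < n + dl ∧ dl ≤ q ∧ q < n + dl then gget lock (p - dl) (q - dl) else 1 := by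
  rw [altL, gget, List.getD_eq_getElem?_getD]
  simp [hp, List.getD_eq_getElem?_getD, hq]

def RepT (M : Nat) (G : List (List Int)) (ts : List (Int × Int × Int)) : Prop :=
  (∀ x ∈ ts, 0 ≤ x.1 ∧ x.1 < (M : Int) ∧ 0 ≤ x.2.1 ∧ x.2.1 < (M : Int) ∧
    x.2.2 = gget G x.1.toNat x.2.1.toNat ∧ x.2.2 ≠ 0) ∧
  (∀ p q : Nat, p < M → q < M → gget G p q ≠ 0 → ((p : Int), (q : Int), gget G p q) ∈ ts)

lemma rep_rot {M : Nat} {G G' : List (List Int)} {ts : List (Int × Int × Int)}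
    (hRep : RepT M G ts)
    (he : ∀ p q, p < M → q < M → gget G' p q = gget G (M - 1 - q) p) :
    RepT M G' (ts.map (fun x => (x.2.1, (M : Int) - 1 - x.1, x.2.2))) := by
  obtain ⟨hS, hC⟩ := hRep
  constructor
  · intro y hy
    rw [List.mem_map] at hy
    obtain ⟨x, hx, rfl⟩ := hy
    obtain ⟨h1, h2, h3, h4, hv, hnz⟩ := hS x hx
    dsimp only
    refine ⟨h3, h4, by omega, by omega, ?_, hnz⟩
    show x.2.2 = gget G' x.2.1.toNat ((M : Int) - 1 - x.1).toNat
    rw [he x.2.1.toNat ((M : Int) - 1 - x.1).toNat (by omega) (by omega)]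
    have e : M - 1 - ((M : Int) - 1 - x.1).toNat = x.1.toNat := by omega
    rw [e]
    exact hv
  · intro p q hp hq hnz
    rw [he p q hp hq] at hnz
    have hmem := hC (M - 1 - q) p (by omega) hp hnz
    rw [List.mem_map]
    refine ⟨(((M - 1 - q : Nat) : Int), (p : Int), gget G (M - 1 - q) p), hmem, ?_⟩
    dsimp only
    rw [he p q hp hq]
    simp only [Prod.mk.injEq, true_and, and_true]
    omega

lemma triples_mem (key : List (List Int)) (m dk : Nat) (x : Int × Int × Int) :
    x ∈ altTriples key m dk ↔ ∃ p q : Nat, p < m ∧ q < m ∧ gget key p q ≠ 0 ∧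
      x = (((p + dk : Nat) : Int), ((q + dk : Nat) : Int), gget key p q) := by
  simp only [altTriples, List.mem_flatMap, List.mem_filterMap, List.mem_range]
  constructor
  · rintro ⟨p, hp, q, hq, hsome⟩
    split at hsome
    · exact ⟨p, q, hp, hq, ‹_›, (Option.some.inj hsome).symm⟩
    · exact absurd hsome (by simp)
  · rintro ⟨p, q, hp, hq, hnz, rfl⟩
    exact ⟨p, hp, q, hq, by rw [if_pos hnz]⟩

lemma triples_rep (key : List (List Int)) (m dk M : Nat) (hmdk : m + dk ≤ M)
    (KA : List (List Int))
    (hKAe : ∀ p q : Nat, p < M → q < M → gget KA p q =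
      if dk ≤ p ∧ p < m + dk ∧ dk ≤ q ∧ q < m + dk then gget key (p - dk) (q - dk) else 0) :
    RepT M KA (altTriples key m dk) := by
  constructor
  · intro x hx
    rw [triples_mem] at hx
    obtain ⟨p, q, hp, hq, hnz, rfl⟩ := hx
    dsimp only
    refine ⟨by omega, by omega, by omega, by omega, ?_, hnz⟩
    show gget key p q = gget KA (((p + dk : Nat) : Int)).toNat (((q + dk : Nat) : Int)).toNat
    have e1 : (((p + dk : Nat) : Int)).toNat = p + dk := by omega
    have e2 : (((q + dk : Nat) : Int)).toNat = q + dk := by omega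
    rw [e1, e2, hKAe (p + dk) (q + dk) (by omega) (by omega),
        if_pos ⟨by omega, by omega, by omega, by omega⟩]
    have e3 : p + dk - dk = p := by omega
    have e4 : q + dk - dk = q := by omega
    rw [e3, e4]
  · intro p q hp hq hnz
    by_cases hw : dk ≤ p ∧ p < m + dk ∧ dk ≤ q ∧ q < m + dk
    · rw [triples_mem]
      refine ⟨p - dk, q - dk, by omega, by omega, ?_, ?_⟩
      · rw [hKAe p q hp hq, if_pos hw] at hnz
        exact hnz
      · dsimp only
        rw [hKAe p q hp hq, if_pos hw]
        simp only [Prod.mk.injEq, true_and, and_true]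
        omega
    · rw [hKAe p q hp hq, if_neg hw] at hnz
      exact absurd rfl hnz

lemma bad_mem (L : List (List Int)) (M : Nat) (z : Int × Int) :
    z ∈ altBad L M ↔ ∃ i j : Nat, i < M ∧ j < M ∧ z = ((i : Int), (j : Int)) ∧
      (gget L i j = 0 ∨ gget L i j > 1) := by
  simp only [altBad, List.mem_flatMap, List.mem_filterMap, List.mem_range]
  constructor
  · rintro ⟨i, hi, j, hj, hsome⟩
    split at hsome
    · exact ⟨i, j, hi, hj, (Option.some.inj hsome).symm, ‹_›⟩
    · exact absurd hsome (by simp)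
  · rintro ⟨i, j, hi, hj, rfl, hcond⟩
    exact ⟨i, hi, j, hj, by rw [if_pos hcond]⟩

lemma bad_char {M : Nat} (L lockA : List (List Int))
    (hLe : ∀ p q, p < M → q < M → gget L p q = gget lockA p q) :
    (∀ z ∈ altBad L M, ∃ i j : Nat, i < M ∧ j < M ∧ z = ((i : Int), (j : Int))) ∧
    (∀ i j : Nat, i < M → j < M →
      (((i : Int), (j : Int)) ∈ altBad L M ↔ (gget lockA i j = 0 ∨ 1 < gget lockA i j))) := by
  constructor
  · intro z hz
    obtain ⟨i, j, hi, hj, rfl, -⟩ := (bad_mem L M z).mp hz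
    exact ⟨i, j, hi, hj, rfl⟩
  · intro i j hi hj
    rw [bad_mem]
    constructor
    · rintro ⟨i', j', hi', hj', heq, hcond⟩
      obtain ⟨hii, hjj⟩ : i' = i ∧ j' = j := by
        simp only [Prod.mk.injEq, Int.natCast_inj] at heq
        exact ⟨heq.1.symm, heq.2.symm⟩
      rw [hii, hjj, hLe i j hi hj] at hcond
      exact hcond
    · intro hcond
      exact ⟨i, j, hi, hj, rfl, by rw [hLe i j hi hj]; exact hcond⟩

lemma coords_char (ts : List (Int × Int × Int)) (z : Int × Int) :
    PySem.Set.contains (PySem.Set.ofList (ts.map (fun x => (x.1, x.2.1)))) z = true ↔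
      ∃ x ∈ ts, ((x.1, x.2.1) : Int × Int) = z := by
  rw [PySem.Set.contains_iff, PySem.Set.mem_ofList, List.mem_map]

lemma check_eqB {M : Nat} (G lockA L : List (List Int)) (ts : List (Int × Int × Int))
    (bad : List (Int × Int))
    (hG : Shape G M) (hlA : Shape lockA M)
    (hLe : ∀ p q, p < M → q < M → gget L p q = gget lockA p q)
    (hRepS : ∀ x ∈ ts, 0 ≤ x.1 ∧ x.1 < (M : Int) ∧ 0 ≤ x.2.1 ∧ x.2.1 < (M : Int) ∧
      x.2.2 = gget G x.1.toNat x.2.1.toNat ∧ x.2.2 ≠ 0)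
    (hRepC : ∀ p q : Nat, p < M → q < M → gget G p q ≠ 0 → ((p : Int), (q : Int), gget G p q) ∈ ts)
    (hbadS : ∀ z ∈ bad, ∃ i j : Nat, i < M ∧ j < M ∧ z = ((i : Int), (j : Int)))
    (hbadC : ∀ i j : Nat, i < M → j < M →
      (((i : Int), (j : Int)) ∈ bad ↔ (gget lockA i j = 0 ∨ 1 < gget lockA i j))) :
    ((PySem.List.pyRange (-(M : Int) + 1) (M : Int) 1).any (fun r =>
      (PySem.List.pyRange (-(M : Int) + 1) (M : Int) 1).any (fun c =>
        isUnlockA (moveKeyA G r c) lockA))) =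
    altCheck M L ts bad (PySem.Set.ofList (ts.map (fun x => (x.1, x.2.1)))) := by
  rw [altCheck]
  have hr : (1 - (M : Int)) = -(M : Int) + 1 := by ring
  rw [hr]
  apply any_congr'
  intro r _
  apply any_congr'
  intro c _
  obtain ⟨hNKsh, hNKe⟩ := movekey_char G hG r c
  rw [isUnlockA, hlA.1, shape_row0 hlA]
  have hform : ((List.range M).all (fun i => (List.range M).all (fun j =>
      let v := gget lockA i j + gget (moveKeyA G r c) i j
      !(v == 0 || decide (v > 1))))) =
    ((List.range M).all (fun i => (List.range M).all (fun j =>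
      okB (gget lockA i j +
        (if 0 ≤ (i : Int) - r ∧ (i : Int) - r < (M : Int) ∧
            0 ≤ (j : Int) - c ∧ (j : Int) - c < (M : Int)
         then gget G ((i : Int) - r).toNat ((j : Int) - c).toNat else 0))))) := by
    apply all_congr'
    intro i hi
    rw [List.mem_range] at hi
    apply all_congr'
    intro j hj
    rw [List.mem_range] at hj
    show (!((gget lockA i j + gget (moveKeyA G r c) i j) == 0 ||
        decide (gget lockA i j + gget (moveKeyA G r c) i j > 1))) = _
    rw [cell_bool, hNKe i j hi hj]
  rw [hform]
  rw [Bool.eq_iff_iff]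
  simp only [List.all_eq_true, List.mem_range, Bool.and_eq_true]
  constructor
  · intro hAll
    constructor
    · intro x hx
      obtain ⟨h1, h2, h3, h4, hv, hnz⟩ := hRepS x hx
      split_ifs with hwin
      · obtain ⟨hw1, hw2, hw3, hw4⟩ := hwin
        have hi : (x.1 + r).toNat < M := by omega
        have hj : (x.2.1 + c).toNat < M := by omega
        have hA := hAll (x.1 + r).toNat hi (x.2.1 + c).toNat hj
        have hC : 0 ≤ (((x.1 + r).toNat : Nat) : Int) - r ∧
            (((x.1 + r).toNat : Nat) : Int) - r < (M : Int) ∧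
            0 ≤ (((x.2.1 + c).toNat : Nat) : Int) - c ∧
            (((x.2.1 + c).toNat : Nat) : Int) - c < (M : Int) := by
          constructor
          · omega
          · exact ⟨by omega, by omega, by omega⟩
        rw [if_pos hC] at hA
        have e1 : ((((x.1 + r).toNat : Nat) : Int) - r).toNat = x.1.toNat := by omega
        have e2 : ((((x.2.1 + c).toNat : Nat) : Int) - c).toNat = x.2.1.toNat := by omega
        rw [e1, e2, ← hv] at hA
        rw [ggetI, hLe (x.1 + r).toNat (x.2.1 + c).toNat hi hj]
        exact hA
      · rfl
    · intro ij hij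
      obtain ⟨i, j, hi, hj, rfl⟩ := hbadS ij hij
      have hbad := (hbadC i j hi hj).mp hij
      have hA := hAll i hi j hj
      rw [coords_char]
      by_cases hC : 0 ≤ (i : Int) - r ∧ (i : Int) - r < (M : Int) ∧
          0 ≤ (j : Int) - c ∧ (j : Int) - c < (M : Int)
      · rw [if_pos hC] at hA
        by_cases hz : gget G ((i : Int) - r).toNat ((j : Int) - c).toNat = 0
        · rw [hz, add_zero] at hA
          simp only [okB, Bool.and_eq_true, Bool.not_eq_true', beq_eq_false_iff_ne,
            decide_eq_true_eq] at hA
          omega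
        · have hmem := hRepC ((i : Int) - r).toNat ((j : Int) - c).toNat (by omega) (by omega) hz
          refine ⟨_, hmem, ?_⟩
          simp only [Prod.mk.injEq]
          exact ⟨by omega, by omega⟩
      · rw [if_neg hC, add_zero] at hA
        simp only [okB, Bool.and_eq_true, Bool.not_eq_true', beq_eq_false_iff_ne,
          decide_eq_true_eq] at hA
        omega
  · rintro ⟨hTs, hBad⟩
    intro i hi j hj
    have hOkL : (gget lockA i j = 0 ∨ 1 < gget lockA i j) →
        PySem.Set.contains (PySem.Set.ofList (ts.map (fun x => (x.1, x.2.1))))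
          ((i : Int) - r, (j : Int) - c) = true := fun hb =>
      hBad ((i : Int), (j : Int)) ((hbadC i j hi hj).mpr hb)
    by_cases hC : 0 ≤ (i : Int) - r ∧ (i : Int) - r < (M : Int) ∧
        0 ≤ (j : Int) - c ∧ (j : Int) - c < (M : Int)
    · rw [if_pos hC]
      by_cases hz : gget G ((i : Int) - r).toNat ((j : Int) - c).toNat = 0
      · rw [hz, add_zero]
        by_contra hnl
        have hb : gget lockA i j = 0 ∨ 1 < gget lockA i j := by
          simp only [okB, Bool.and_eq_true, Bool.not_eq_true', beq_eq_false_iff_ne,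
            decide_eq_true_eq] at hnl
          omega
        have := hOkL hb
        rw [coords_char] at this
        obtain ⟨x, hx, hxe⟩ := this
        obtain ⟨h1, h2, h3, h4, hv, hnz⟩ := hRepS x hx
        simp only [Prod.mk.injEq] at hxe
        apply hnz
        rw [hv]
        have e1 : x.1.toNat = ((i : Int) - r).toNat := by omega
        have e2 : x.2.1.toNat = ((j : Int) - c).toNat := by omega
        rw [e1, e2]
        exact hz
      · have hmem := hRepC ((i : Int) - r).toNat ((j : Int) - c).toNat (by omega) (by omega) hz
        have hT := hTs _ hmem
        have hwin : 0 ≤ ((((i : Int) - r).toNat : Nat) : Int) + r ∧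
            ((((i : Int) - r).toNat : Nat) : Int) + r < (M : Int) ∧
            0 ≤ ((((j : Int) - c).toNat : Nat) : Int) + c ∧
            ((((j : Int) - c).toNat : Nat) : Int) + c < (M : Int) := by
          refine ⟨by omega, by omega, by omega, by omega⟩
        rw [if_pos hwin] at hT
        rw [ggetI] at hT
        have e1 : (((((i : Int) - r).toNat : Nat) : Int) + r).toNat = i := by omega
        have e2 : (((((j : Int) - c).toNat : Nat) : Int) + c).toNat = j := by omega
        rw [e1, e2, hLe i j hi hj] at hT
        exact hT
    · rw [if_neg hC, add_zero]
      by_contra hnl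
      have hb : gget lockA i j = 0 ∨ 1 < gget lockA i j := by
        simp only [okB, Bool.and_eq_true, Bool.not_eq_true', beq_eq_false_iff_ne,
          decide_eq_true_eq] at hnl
        omega
      have := hOkL hb
      rw [coords_char] at this
      obtain ⟨x, hx, hxe⟩ := this
      obtain ⟨h1, h2, h3, h4, hv, hnz⟩ := hRepS x hx
      simp only [Prod.mk.injEq] at hxe
      omega

lemma altLoop_succ (t M : Nat) (L : List (List Int)) (ts : List (Int × Int × Int))
    (bad : List (Int × Int)) :
    altLoop (t + 1) M L ts bad =
      (altCheck M L ts bad (PySem.Set.ofList (ts.map (fun x => (x.1, x.2.1)))) ||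
       altLoop t M L (ts.map (fun x => (x.2.1, (M : Int) - 1 - x.1, x.2.2))) bad) := by
  cases h : altCheck M L ts bad (PySem.Set.ofList (ts.map (fun x => (x.1, x.2.1)))) <;>
    simp [altLoop, h]

lemma coreB {M : Nat} (keyA lockA L : List (List Int)) (ts : List (Int × Int × Int))
    (bad : List (Int × Int))
    (hkA : Shape keyA M) (hlA : Shape lockA M)
    (hLe : ∀ p q, p < M → q < M → gget L p q = gget lockA p q)
    (hRep : RepT M keyA ts)
    (hbadS : ∀ z ∈ bad, ∃ i j : Nat, i < M ∧ j < M ∧ z = ((i : Int), (j : Int)))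
    (hbadC : ∀ i j : Nat, i < M → j < M →
      (((i : Int), (j : Int)) ∈ bad ↔ (gget lockA i j = 0 ∨ 1 < gget lockA i j))) :
    ((rotateA keyA).any (fun rkey =>
      (PySem.List.pyRange (-(keyA.length : Int) + 1) (keyA.length : Int) 1).any (fun i =>
        (PySem.List.pyRange (-(keyA.length : Int) + 1) (keyA.length : Int) 1).any (fun j =>
          isUnlockA (moveKeyA rkey i j) lockA)))) = altLoop 4 M L ts bad := by
  rw [hkA.1]
  obtain ⟨P1, P2, P3, hrot, hs1, hs2, hs3, he1, he2, he3⟩ := rotateA_char keyA hkA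
  rw [hrot]
  simp only [List.any_cons, List.any_nil, Bool.or_false]
  have hR1 := rep_rot hRep he1
  have hR2 := rep_rot hR1 he2
  have hR3 := rep_rot hR2 he3
  rw [show (4 : Nat) = 3 + 1 from rfl, altLoop_succ, show (3 : Nat) = 2 + 1 from rfl, altLoop_succ,
      show (2 : Nat) = 1 + 1 from rfl, altLoop_succ, show (1 : Nat) = 0 + 1 from rfl, altLoop_succ]
  have h0 : ∀ ts', altLoop 0 M L ts' bad = false := fun _ => rfl
  rw [h0, Bool.or_false]
  rw [check_eqB keyA lockA L ts bad hkA hlA hLe hRep.1 hRep.2 hbadS hbadC,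
      check_eqB P1 lockA L _ bad hs1 hlA hLe hR1.1 hR1.2 hbadS hbadC,
      check_eqB P2 lockA L _ bad hs2 hlA hLe hR2.1 hR2.2 hbadS hbadC,
      check_eqB P3 lockA L _ bad hs3 hlA hLe hR3.1 hR3.2 hbadS hbadC]

-- ===== VERDICT (by name: the statement is the Claim_ definition above) =====
theorem solution_spec : Claim_equal_solution := by
  intro key lock _ hpre
  obtain ⟨hpk, hpl⟩ := hpre
  have hkS : Shape key key.length := ⟨rfl, fun i hi => hpk _ (getD_mem_of_lt hi [])⟩
  have hlS : Shape lock lock.length := ⟨rfl, fun i hi => hpl _ (getD_mem_of_lt hi [])⟩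
  show solution key lock = solution_alt key lock
  by_cases h1 : lock.length < key.length
  · have h2 : ¬ key.length < lock.length := by omega
    have hM : max key.length lock.length = key.length := by omega
    simp only [solution, solution_alt, h1, h2, if_true, if_false, hM]
    obtain ⟨hLAsh, hLAe⟩ :=
      expandA_char lock false key.length ((key.length - lock.length) / 2) (by omega)
    have hLe : ∀ p q, p < key.length → q < key.length →
        gget (altL lock lock.length key.length ((key.length - lock.length) / 2)) p q =
        gget (expandA lock false key.length ((key.length - lock.length) / 2)) p q := by
      intro p q hp hq
      rw [altL_entry lock lock.length key.length _ p q hp hq, hLAe p q hp hq]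
      simp
    obtain ⟨hbS, hbC⟩ := bad_char _ _ hLe
    refine coreB key _ _ _ _ hkS hLAsh hLe ?_ hbS hbC
    refine triples_rep key key.length 0 key.length (by omega) key ?_
    intro p q hp hq
    rw [if_pos ⟨by omega, by omega, by omega, by omega⟩]
    simp
  · by_cases h2 : key.length < lock.length
    · have hM : max key.length lock.length = lock.length := by omega
      simp only [solution, solution_alt, h1, h2, if_true, if_false, hM]
      obtain ⟨hKAsh, hKAe⟩ :=
        expandA_char key true lock.length ((lock.length - key.length) / 2) (by omega)
      have hLe : ∀ p q, p < lock.length → q < lock.length →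
          gget (altL lock lock.length lock.length 0) p q = gget lock p q := by
        intro p q hp hq
        rw [altL_entry lock lock.length lock.length 0 p q hp hq,
            if_pos ⟨by omega, by omega, by omega, by omega⟩]
        simp
      obtain ⟨hbS, hbC⟩ := bad_char _ _ hLe
      refine coreB _ lock _ _ _ hKAsh hlS hLe ?_ hbS hbC
      refine triples_rep key key.length ((lock.length - key.length) / 2) lock.length (by omega) _ ?_
      intro p q hp hq
      rw [hKAe p q hp hq]
      rfl
    · have hM : max key.length lock.length = key.length := by omega
      have heq : lock.length = key.length := by omega
      simp only [solution, solution_alt, h1, h2, if_true, if_false, hM]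
      have hLe : ∀ p q, p < key.length → q < key.length →
          gget (altL lock lock.length key.length 0) p q = gget lock p q := by
        intro p q hp hq
        rw [altL_entry lock lock.length key.length 0 p q hp hq,
            if_pos ⟨by omega, by omega, by omega, by omega⟩]
        simp
      obtain ⟨hbS, hbC⟩ := bad_char _ _ hLe
      refine coreB key lock _ _ _ hkS (heq ▸ hlS) hLe ?_ hbS hbC
      refine triples_rep key key.length 0 key.length (by omega) key ?_
      intro p q hp hq
      rw [if_pos ⟨by omega, by omega, by omega, by omega⟩]
      simp
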